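-- pv_equiv track=rewrite | github.com/srinithishs004/Sri-Nithish.S_SVCT_2025 | 27-01-2024/filling jars.py | solve
-- ===== SOURCE A (Python) =====
-- def solve(n, operations):
--     total_candies = 0
--     for operation in operations:
--         a, b, k = operation
--         jars_affected = b - a + 1
--         candies_added = k * jars_affected
--         total_candies += candies_added
--
--     average = total_candies // n
--     return average
-- ===== SOURCE B (Python) =====
-- def solve(n, operations):
--     # Sweep line: turn each range op into two events (+k at a, -k at b+1),
--     # sort events by position, and integrate the running delta over the line.
--     events = []
--     for a, b, k in operations:
--         events.append((a, k))
--         events.append((b + 1, -k))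
--     events.sort(key=lambda e: e[0])
--     total = 0
--     running = 0
--     prev = 0
--     for pos, delta in events:
--         total += running * (pos - prev)
--         running += delta
--         prev = pos
--     return total // n
-- ===== Notes on version B (the rewrite author's own statement) =====
-- stated objective: alternative
-- what changed: A sums k*(b-a+1) per operation in one arithmetic loop; B is a sweep line: it emits +k/-k boundary events per operation, sorts them by position, and integrates the running delta over the sorted event list before dividing by n.
-- outside the precondition, e.g. on solve(0, [(1, 2, 3)]): A raises ZeroDivisionError, B raises ZeroDivisionError
import Mathlib
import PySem

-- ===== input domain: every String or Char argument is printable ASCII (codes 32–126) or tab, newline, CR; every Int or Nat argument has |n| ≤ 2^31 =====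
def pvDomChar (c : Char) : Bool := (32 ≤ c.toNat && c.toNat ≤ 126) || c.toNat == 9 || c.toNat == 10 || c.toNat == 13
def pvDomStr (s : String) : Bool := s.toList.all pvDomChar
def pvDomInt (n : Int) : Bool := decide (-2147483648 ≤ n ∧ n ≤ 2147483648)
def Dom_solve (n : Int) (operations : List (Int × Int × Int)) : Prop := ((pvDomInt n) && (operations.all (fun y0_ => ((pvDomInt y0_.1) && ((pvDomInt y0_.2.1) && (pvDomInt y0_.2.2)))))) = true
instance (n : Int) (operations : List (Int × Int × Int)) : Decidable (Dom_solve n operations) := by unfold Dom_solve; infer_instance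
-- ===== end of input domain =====

-- B replaces A's per-operation arithmetic loop by a sweep line over sorted boundary events (alternative algorithm, same cost class).

-- ===== PORT A =====
def solve (n : Int) (operations : List (Int × Int × Int)) : Int :=
  let total_candies := operations.foldl
    (fun total_candies op => total_candies + op.2.2 * (op.2.1 - op.1 + 1)) 0
  PySem.Int.floordiv total_candies n

-- ===== PORT B =====
def solve_alt (n : Int) (operations : List (Int × Int × Int)) : Int :=
  let events := operations.foldl
    (fun acc op => acc ++ [(op.1, op.2.2), (op.2.1 + 1, -op.2.2)]) []
  let sortedEvents := PySem.List.sorted events (fun e => e.1) false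
  let st := sortedEvents.foldl
    (fun (s : Int × Int × Int) e => (s.1 + s.2.1 * (e.1 - s.2.2), s.2.1 + e.2, e.1))
    (0, 0, 0)
  PySem.Int.floordiv st.1 n

-- ===== PRECONDITION & SPEC =====
-- Pre_ excludes n = 0, on which Python's '//' raises ZeroDivisionError in both A and B.
def Pre_solve (n : Int) (operations : List (Int × Int × Int)) : Prop := n ≠ 0
instance (n : Int) (operations : List (Int × Int × Int)) : Decidable (Pre_solve n operations) := by unfold Pre_solve; infer_instance
def pvWitness_solve : Int × (List (Int × Int × Int)) := (5, [(1, 3, 2), (2, 4, 1)])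
def Spec_solve (n : Int) (operations : List (Int × Int × Int)) (out : Int) : Prop := out = solve_alt n operations
instance (n : Int) (operations : List (Int × Int × Int)) (out : Int) : Decidable (Spec_solve n operations out) := by unfold Spec_solve; infer_instance

-- ===== CLAIM (what is proved, stated in full; the proofs are below) =====
def Claim_equal_solve : Prop := ∀ (n : Int) (operations : List (Int × Int × Int)), Dom_solve n operations → Pre_solve n operations → Spec_solve n operations (solve n operations)

-- ===== LEMMAS AND PROOFS =====

-- last event position of a list, with default
def lastPos (l : List (Int × Int)) (p : Int) : Int := (l.map Prod.fst).getLastD p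

-- the contribution of the events in l to the swept total, given each event's suffix
def Kc : List (Int × Int) → Int
  | [] => 0
  | (q, d) :: tl => d * (lastPos tl q - q) + Kc tl

theorem lastPos_cons (e : Int × Int) (tl : List (Int × Int)) (p : Int) :
    lastPos (e :: tl) p = lastPos tl e.1 := by
  simp only [lastPos, List.map_cons, List.getLastD_cons]

theorem sweep_closed (l : List (Int × Int)) : ∀ (t r p : Int),
    (l.foldl (fun (s : Int × Int × Int) e =>
        (s.1 + s.2.1 * (e.1 - s.2.2), s.2.1 + e.2, e.1)) (t, r, p)).1
      = t + r * (lastPos l p - p) + Kc l := by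
  induction l with
  | nil => intro t r p; simp [lastPos, Kc]
  | cons e tl ih =>
    intro t r p
    obtain ⟨q, d⟩ := e
    simp only [List.foldl_cons, Kc, lastPos_cons]
    rw [ih]
    ring

theorem Kc_closed (l : List (Int × Int)) : ∀ (dft : Int),
    Kc l = (l.map Prod.snd).sum * lastPos l dft - (l.map (fun e => e.2 * e.1)).sum := by
  induction l with
  | nil => intro dft; simp [Kc, lastPos]
  | cons e tl ih =>
    intro dft
    obtain ⟨q, d⟩ := e
    simp only [Kc, lastPos_cons, List.map_cons, List.sum_cons]
    rw [ih q]
    ring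

theorem events_foldl_eq (operations : List (Int × Int × Int)) : ∀ (acc : List (Int × Int)),
    operations.foldl (fun acc op => acc ++ [(op.1, op.2.2), (op.2.1 + 1, -op.2.2)]) acc
      = acc ++ operations.flatMap (fun op => [(op.1, op.2.2), (op.2.1 + 1, -op.2.2)]) := by
  induction operations with
  | nil => intro acc; simp
  | cons op tl ih => intro acc; simp [List.foldl_cons, ih, List.flatMap_cons]

theorem sum_snd_events (operations : List (Int × Int × Int)) :
    ((operations.flatMap (fun op => [(op.1, op.2.2), (op.2.1 + 1, -op.2.2)])).map Prod.snd).sum = 0 := by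
  induction operations with
  | nil => simp
  | cons op tl ih => simp [List.flatMap_cons, ih]

theorem sum_wp_events (operations : List (Int × Int × Int)) :
    ((operations.flatMap (fun op => [(op.1, op.2.2), (op.2.1 + 1, -op.2.2)])).map
        (fun e => e.2 * e.1)).sum
      = -(operations.map (fun op => op.2.2 * (op.2.1 - op.1 + 1))).sum := by
  induction operations with
  | nil => simp
  | cons op tl ih => simp [List.flatMap_cons, ih]; ring

theorem foldl_total (operations : List (Int × Int × Int)) : ∀ (t : Int),
    operations.foldl (fun total op => total + op.2.2 * (op.2.1 - op.1 + 1)) t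
      = t + (operations.map (fun op => op.2.2 * (op.2.1 - op.1 + 1))).sum := by
  induction operations with
  | nil => intro t; simp
  | cons op tl ih => intro t; simp [List.foldl_cons, ih]; ring

theorem totals_eq (n : Int) (operations : List (Int × Int × Int)) :
    solve n operations = solve_alt n operations := by
  unfold solve solve_alt
  dsimp only
  have hev := events_foldl_eq operations []
  simp only [List.nil_append] at hev
  rw [hev, foldl_total, sweep_closed]
  set ev := operations.flatMap (fun op => [(op.1, op.2.2), (op.2.1 + 1, -op.2.2)]) with hevdef
  have hperm : (PySem.List.sorted ev (fun e => e.1) false).Perm ev :=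
    PySem.List.sorted_perm ev (fun e => e.1) false
  rw [Kc_closed _ 0]
  rw [(hperm.map Prod.snd).sum_eq, (hperm.map (fun e => e.2 * e.1)).sum_eq]
  rw [sum_snd_events, sum_wp_events]
  ring_nf

-- ===== VERDICT (by name: the statement is the Claim_ definition above) =====
theorem solve_spec : Claim_equal_solve := by
  intro n operations _ _
  unfold Spec_solve
  exact totals_eq n operations
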